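-- pv_equiv track=rewrite | github.com/uxdx/orim-functions | 새 폴더/search.py | old_uploadDate
-- ===== SOURCE A (Python) =====
-- def old_uploadDate(videolist:list):
--     a=dict()
--     j=0
--     for i in videolist:
--         a[i['uploadDate']]=j
--         j+=1
--     b=sorted(a.items(),reverse=False)
--     c=[]
--     for i in b:
--         c.append(i[1])
--     d=[]
--     for i in c:
--         d.append(videolist[i])
--     return d
-- ===== SOURCE B (Python) =====
-- def old_uploadDate(videolist: list):
--     s = sorted(videolist, key=lambda v: v['uploadDate'])
--     result = []
--     for cur, nxt in zip(s, s[1:]):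
--         if nxt['uploadDate'] != cur['uploadDate']:
--             result.append(cur)
--     if s:
--         result.append(s[-1])
--     return result
-- ===== Notes on version B (the rewrite author's own statement) =====
-- stated objective: simpler
-- what changed: Replaces A's date->last-index dict plus sorted(items) plus index lookups by a single stable sort on uploadDate followed by one pairwise pass that keeps the last element of each equal-date run.
import Mathlib
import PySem

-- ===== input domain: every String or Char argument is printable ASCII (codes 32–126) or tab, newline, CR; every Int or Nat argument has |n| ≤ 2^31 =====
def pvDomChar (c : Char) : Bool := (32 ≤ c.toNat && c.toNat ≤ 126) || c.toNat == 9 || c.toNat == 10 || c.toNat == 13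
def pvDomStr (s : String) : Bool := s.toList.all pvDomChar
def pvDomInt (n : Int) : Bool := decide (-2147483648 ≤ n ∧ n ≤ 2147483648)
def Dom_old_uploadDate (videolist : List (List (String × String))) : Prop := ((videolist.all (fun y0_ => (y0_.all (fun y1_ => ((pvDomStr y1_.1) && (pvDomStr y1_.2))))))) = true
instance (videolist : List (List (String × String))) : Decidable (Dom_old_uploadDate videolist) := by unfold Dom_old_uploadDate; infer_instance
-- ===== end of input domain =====

-- B replaces A's date→last-index dict + sorted(items) + index lookups by a stable sort on the date
-- followed by one pairwise pass keeping the last element of each equal-date run (objective: simpler).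

-- ===== PORT A =====
-- i['uploadDate']: first-match dict lookup; the .getD "" arm is the KeyError case, excluded by Pre_.
def aDate (v : List (String × String)) : String :=
  (((v.find? (fun p => p.1 == "uploadDate")).map Prod.snd).getD "")

def old_uploadDate (videolist : List (List (String × String))) : List (List (String × String)) :=
  -- a = dict(); j = 0; for i in videolist: a[i['uploadDate']] = j; j += 1
  let aj := videolist.foldl
    (fun (st : PySem.Dict String Int × Int) i => (st.1.insert (aDate i) st.2, st.2 + 1))
    (PySem.Dict.empty, 0)
  -- b = sorted(a.items(), reverse=False)   (tuple comparison)
  let b := PySem.List.sorted2 aj.1.items (fun p => p.1) (fun p => p.2) false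
  -- c = []; for i in b: c.append(i[1])
  let c := b.foldl (fun acc i => acc ++ [i.2]) ([] : List Int)
  -- d = []; for i in c: d.append(videolist[i])   (indices always in range, so pyGetD is exact)
  c.foldl (fun acc i => acc ++ [PySem.List.pyGetD videolist i []]) []

-- ===== PORT B =====
-- v['uploadDate'] as B reads it; the [] arm is the KeyError case, excluded by Pre_.
def bDate : List (String × String) → String
  | [] => ""
  | p :: t => if p.1 = "uploadDate" then p.2 else bDate t

-- the zip(s, s[1:]) pass of Source B: keep cur when the next date differs; the last element always stays
def keepLast : List (List (String × String)) → List (List (String × String))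
  | [] => []
  | [x] => [x]
  | x :: y :: t => if bDate y = bDate x then keepLast (y :: t) else x :: keepLast (y :: t)

def old_uploadDate_alt (videolist : List (List (String × String))) : List (List (String × String)) :=
  keepLast (PySem.List.sorted videolist bDate false)

-- ===== PRECONDITION & SPEC =====
-- Pre_ excludes exactly the inputs on which the Python A (and B) raises KeyError: a video without
-- the 'uploadDate' key. The equivalence proof itself holds on all inputs.
def Pre_old_uploadDate (videolist : List (List (String × String))) : Prop :=
  (videolist.all (fun v => v.any (fun p => p.1 == "uploadDate"))) = true
instance (videolist : List (List (String × String))) : Decidable (Pre_old_uploadDate videolist) := by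
  unfold Pre_old_uploadDate; infer_instance

def pvWitness_old_uploadDate : (List (List (String × String))) :=
  [[("uploadDate", "2020-01-01"), ("title", "a")], [("uploadDate", "2019-05-05")]]

def Spec_old_uploadDate (videolist : List (List (String × String))) (out : List (List (String × String))) : Prop := out = old_uploadDate_alt videolist
instance (videolist : List (List (String × String))) (out : List (List (String × String))) : Decidable (Spec_old_uploadDate videolist out) := by unfold Spec_old_uploadDate; infer_instance

-- ===== CLAIM (what is proved, stated in full; the proofs are below) =====
def Claim_equal_old_uploadDate : Prop := ∀ (videolist : List (List (String × String))), Dom_old_uploadDate videolist → Pre_old_uploadDate videolist → Spec_old_uploadDate videolist (old_uploadDate videolist)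

-- ===== LEMMAS AND PROOFS =====

-- the two lookups compute the same date
theorem aDate_eq_bDate : aDate = bDate := by
  funext v
  induction v with
  | nil => rfl
  | cons p t ih =>
    by_cases h : p.1 = "uploadDate"
    · simp [aDate, bDate, h]
    · rw [bDate, if_neg h, ← ih]
      simp [aDate, h]

-- canonical value both programs compute: for each distinct date in ascending order,
-- the last video carrying it
def lastD (xs : List (List (String × String))) (d : String) : List (String × String) :=
  ((xs.filter (fun v => bDate v == d)).getLast?).getD []

def canon (xs : List (List (String × String))) : List (List (String × String)) :=
  (PySem.List.sorted (PySem.Set.ofList (xs.map bDate)) (fun s => s) false).map (lastD xs)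

-- ---- A-side ----

def dictA (xs : List (List (String × String))) : PySem.Dict String Int × Int :=
  xs.foldl (fun st i => (st.1.insert (aDate i) st.2, st.2 + 1)) (PySem.Dict.empty, 0)

theorem dictA_snd (xs : List (List (String × String))) :
    ∀ (d : PySem.Dict String Int) (j : Int),
      (xs.foldl (fun st i => (st.1.insert (aDate i) st.2, st.2 + 1)) (d, j)).2 = j + xs.length := by
  induction xs with
  | nil => simp
  | cons x t ih => intro d j; simp [List.foldl_cons, ih]; ring

theorem dictA_append (xs : List (List (String × String))) (v : List (String × String)) :
    dictA (xs ++ [v]) = ((dictA xs).1.insert (aDate v) (xs.length : Int), (xs.length : Int) + 1) := by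
  unfold dictA
  rw [List.foldl_append]
  have h2 := dictA_snd xs PySem.Dict.empty 0
  simp only [List.foldl_cons, List.foldl_nil]
  rw [h2]
  norm_num

theorem keysA (xs : List (List (String × String))) :
    (dictA xs).1.keys = PySem.Set.ofList (xs.map (fun v => aDate v)) := by
  induction xs using List.reverseRecOn with
  | nil => rfl
  | append_singleton xs v ih =>
    rw [dictA_append, List.map_append, List.map_cons, List.map_nil]
    show ((dictA xs).1.insert (aDate v) (xs.length : Int)).keys = _
    rw [PySem.Set.ofList, List.foldl_append, List.foldl_cons, List.foldl_nil, ← PySem.Set.ofList]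
    rw [← ih]
    by_cases hc : (dictA xs).1.contains (aDate v) = true
    · rw [PySem.Dict.keys_insert_of_contains _ _ hc]
      have hm : aDate v ∈ (dictA xs).1.keys := (PySem.Dict.contains_iff_mem_keys _ _).mp hc
      simp [PySem.Set.add, hm]
    · rw [PySem.Dict.keys_insert_of_not_contains _ _ (by simpa using hc)]
      have hm : aDate v ∉ (dictA xs).1.keys :=
        fun hm => hc ((PySem.Dict.contains_iff_mem_keys _ _).mpr hm)
      simp [PySem.Set.add, hm]

-- the dict value at date k indexes the last element of xs carrying date k
theorem getD_lastD (xs : List (List (String × String))) :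
    ∀ k ∈ xs.map (fun v => aDate v), ∃ i : Nat, i < xs.length ∧
      (dictA xs).1.getD k 0 = (i : Int) ∧
      (xs.filter (fun v => aDate v == k)).getLast? = some (xs.getD i []) := by
  induction xs using List.reverseRecOn with
  | nil => simp
  | append_singleton xs v ih =>
    intro k hk
    rw [dictA_append]
    by_cases hkv : k = aDate v
    · subst hkv
      refine ⟨xs.length, by simp, ?_, ?_⟩
      · show ((dictA xs).1.insert (aDate v) (xs.length : Int)).getD (aDate v) 0 = _
        rw [PySem.Dict.getD_insert_self]
      · rw [List.filter_append]
        simp only [List.filter_cons, beq_self_eq_true, if_pos, List.filter_nil]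
        rw [List.getLast?_append_cons]
        simp [List.getD_eq_getElem?_getD]
    · have hk' : k ∈ xs.map (fun v => aDate v) := by
        rw [List.map_append] at hk
        rcases List.mem_append.mp hk with h | h
        · exact h
        · simp at h; exact absurd h hkv
      obtain ⟨i, hi, hg, hl⟩ := ih k hk'
      refine ⟨i, by simp; omega, ?_, ?_⟩
      · show ((dictA xs).1.insert (aDate v) (xs.length : Int)).getD k 0 = _
        rw [PySem.Dict.getD_insert_of_ne _ _ _ hkv, hg]
      · rw [List.filter_append]
        have : (([v]).filter (fun v => aDate v == k)) = [] := by
          simp; exact fun hh => hkv hh.symm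
        rw [this, List.append_nil, hl]
        congr 1
        rw [List.getD_eq_getElem?_getD, List.getD_eq_getElem?_getD,
            List.getElem?_append_left hi]

-- sorted2 with pairwise-distinct first keys is sorted by the first key alone
theorem insertBy_congr {α : Type} (b1 b2 : α → α → Bool) (x : α) (l : List α)
    (h : ∀ y ∈ l, b1 x y = b2 x y) :
    PySem.List.insertBy b1 x l = PySem.List.insertBy b2 x l := by
  induction l with
  | nil => rfl
  | cons y ys ih =>
    simp only [PySem.List.insertBy]
    rw [h y (by simp)]
    by_cases hb : b2 x y = true
    · simp [hb]
    · simp only [hb, if_false, Bool.false_eq_true]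
      rw [ih (fun z hz => h z (by simp [hz]))]

theorem foldl_insertBy_congr {α : Type} (b1 b2 : α → α → Bool) (l : List α) :
    ∀ acc : List α,
      (∀ a ∈ l, ∀ y ∈ acc, b1 a y = b2 a y) → (∀ a ∈ l, ∀ c ∈ l, b1 a c = b2 a c) →
      l.foldl (fun acc x => PySem.List.insertBy b1 x acc) acc
        = l.foldl (fun acc x => PySem.List.insertBy b2 x acc) acc := by
  induction l with
  | nil => intro acc _ _; rfl
  | cons w t ih =>
    intro acc hacc hl
    simp only [List.foldl_cons]
    rw [insertBy_congr b1 b2 w acc (fun y hy => hacc w (by simp) y hy)]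
    apply ih
    · intro a ha y hy
      rw [PySem.List.mem_insertBy] at hy
      rcases hy with h | hy
      · rw [h]; exact hl a (by simp [ha]) w (by simp)
      · exact hacc a (by simp [ha]) y hy
    · intro a ha c hc; exact hl a (by simp [ha]) c (by simp [hc])

theorem sorted2_eq_sorted_fst (l : List (String × Int)) (hnd : (l.map (fun p => p.1)).Nodup) :
    PySem.List.sorted2 l (fun p => p.1) (fun p => p.2) false
      = PySem.List.sorted l (fun p => p.1) false := by
  simp only [PySem.List.sorted2, PySem.List.sorted]
  apply foldl_insertBy_congr
  · intro a _ y hy; simp at hy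
  · intro a ha c hc
    by_cases h1 : a.1 = c.1
    · have : a = c := List.inj_on_of_nodup_map hnd ha hc h1
      subst this
      simp
    · rcases lt_trichotomy a.1 c.1 with h | h | h
      · simp [h]
      · exact absurd h h1
      · simp [h, not_lt_of_gt h]

theorem a_eq_canon (xs : List (List (String × String))) : old_uploadDate xs = canon xs := by
  have hkeys : (dictA xs).1.keys.Nodup := by rw [keysA]; exact PySem.Set.nodup_ofList _
  show (let aj := dictA xs;
    let b := PySem.List.sorted2 aj.1.items (fun p => p.1) (fun p => p.2) false;
    let c := b.foldl (fun acc i => acc ++ [i.2]) ([] : List Int);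
    c.foldl (fun acc i => acc ++ [PySem.List.pyGetD xs i []]) []) = canon xs
  simp only [PySem.List.foldl_append_singleton_eq_map, List.nil_append, List.map_map]
  rw [sorted2_eq_sorted_fst _ hkeys]
  rw [PySem.Dict.items_eq_map_keys _ hkeys (0 : Int)]
  have hsmap : PySem.List.sorted ((dictA xs).1.keys.map (fun k => (k, (dictA xs).1.getD k 0)))
      (fun p => p.1) false
      = (PySem.List.sorted (dictA xs).1.keys (fun s => s) false).map
          (fun k => (k, (dictA xs).1.getD k 0)) := by
    apply PySem.List.sorted_eq_of_perm_of_pairwise_lt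
    · exact (PySem.List.sorted_perm _ _ _).map _
    · rw [List.pairwise_map]
      rw [keysA]
      exact PySem.List.sorted_ofList_pairwise_lt _
  rw [hsmap, List.map_map]
  unfold canon
  have hmapdates : xs.map (fun v => aDate v) = xs.map bDate := by
    simp only [aDate_eq_bDate]
  rw [keysA, hmapdates]
  apply List.map_congr_left
  intro k hk
  have hk' : k ∈ xs.map bDate := by
    rw [PySem.List.mem_sorted, PySem.Set.mem_ofList] at hk
    exact hk
  obtain ⟨i, hi, hg, hl⟩ := getD_lastD xs k (by rwa [hmapdates])
  simp only [Function.comp_apply, hg, PySem.List.pyGetD_natCast]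
  unfold lastD
  have hl' : (xs.filter (fun v => bDate v == k)).getLast? = some (xs.getD i []) := by
    rw [← hl]; simp only [aDate_eq_bDate]
  rw [hl']
  rfl

-- ---- B-side ----

theorem filter_insertBy (key : List (String × String) → String) (x : List (String × String))
    (d : String) (l : List (List (String × String)))
    (hl : l.Pairwise (fun a b => key a ≤ key b)) :
    (PySem.List.insertBy (fun a b => decide (key a < key b)) x l).filter (fun y => key y == d)
      = if key x == d then l.filter (fun y => key y == d) ++ [x]
        else l.filter (fun y => key y == d) := by
  induction l with
  | nil =>
    simp only [PySem.List.insertBy, List.filter_cons, List.filter_nil]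
    by_cases hxd : key x == d <;> simp [hxd]
  | cons y ys ih =>
    rw [List.pairwise_cons] at hl
    simp only [PySem.List.insertBy]
    by_cases hxy : key x < key y
    · simp only [hxy, decide_true, if_true]
      by_cases hxd : key x == d
      · have hempty : (y :: ys).filter (fun z => key z == d) = [] := by
          rw [List.filter_eq_nil_iff]
          intro z hz
          have hyz : key y ≤ key z := by
            rcases hz with _ | hz
            · exact le_refl _
            · exact hl.1 z (by assumption)
          have : key x < key z := lt_of_lt_of_le hxy hyz
          simp only [beq_iff_eq] at hxd ⊢
          rw [← hxd]
          exact fun hh => absurd hh.symm (ne_of_lt this)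
        rw [List.filter_cons_of_pos (by simpa using hxd), hempty]
        simp [hxd]
      · have hxd' : (key x == d) = false := by simpa using hxd
        simp [List.filter_cons, hxd']
    · simp only [hxy, decide_false, Bool.false_eq_true, if_false]
      rw [List.filter_cons, List.filter_cons, ih hl.2]
      by_cases hyd : key y == d <;> by_cases hxd : key x == d <;>
        simp [hyd, hxd]

-- stability of the sort: the equal-date subsequence is exactly that of the input
theorem sorted_filter_date (xs : List (List (String × String))) (d : String) :
    (PySem.List.sorted xs bDate false).filter (fun v => bDate v == d)
      = xs.filter (fun v => bDate v == d) := by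
  induction xs using List.reverseRecOn with
  | nil => rfl
  | append_singleton xs v ih =>
    rw [PySem.List.sorted_eq_foldl_insertBy, List.foldl_append, List.foldl_cons, List.foldl_nil,
        ← PySem.List.sorted_eq_foldl_insertBy]
    rw [filter_insertBy bDate v d _ (PySem.List.sorted_pairwise xs bDate)]
    rw [List.filter_append, ih, List.filter_cons, List.filter_nil]
    by_cases hvd : bDate v == d <;> simp [hvd]

theorem foldl_add_cons {c : String} (l : List String) :
    ∀ s : List String, (∀ z ∈ l, z ≠ c) →
      List.foldl PySem.Set.add (c :: s) l = c :: List.foldl PySem.Set.add s l := by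
  induction l with
  | nil => intro s _; rfl
  | cons z t ih =>
    intro s h
    simp only [List.foldl_cons]
    have hz : z ≠ c := h z (by simp)
    have hcc : PySem.Set.add (c :: s) z = c :: PySem.Set.add s z := by
      simp only [PySem.Set.add, PySem.Set.contains, List.contains_cons]
      by_cases hm : z ∈ s <;> simp [hm, hz]
    rw [hcc]
    exact ih (PySem.Set.add s z) (fun w hw => h w (by simp [hw]))

theorem keepLast_canon : ∀ s : List (List (String × String)),
    s.Pairwise (fun a b => bDate a ≤ bDate b) → keepLast s = canon s := by
  intro s
  induction s using keepLast.induct with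
  | case1 => intro _; rfl
  | case2 x =>
    intro _
    show [x] = canon [x]
    unfold canon
    simp only [List.map_cons, List.map_nil]
    rw [show PySem.Set.ofList [bDate x] = [bDate x] from rfl]
    rw [show PySem.List.sorted [bDate x] (fun s => s) false = [bDate x] by
      simp [PySem.List.sorted, PySem.List.insertBy]]
    simp [lastD]
  | case3 x y t heq ih =>
    intro hp
    rw [keepLast, if_pos heq]
    rw [List.pairwise_cons] at hp
    rw [ih hp.2]
    unfold canon
    have hdates : PySem.Set.ofList ((x :: y :: t).map bDate)
        = PySem.Set.ofList ((y :: t).map bDate) := by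
      simp only [List.map_cons]
      rw [show PySem.Set.ofList (bDate x :: bDate y :: t.map bDate)
          = List.foldl PySem.Set.add (PySem.Set.add (PySem.Set.add PySem.Set.empty (bDate x)) (bDate y)) (t.map bDate) from rfl]
      rw [show PySem.Set.ofList (bDate y :: t.map bDate)
          = List.foldl PySem.Set.add (PySem.Set.add PySem.Set.empty (bDate y)) (t.map bDate) from rfl]
      congr 1
      simp [PySem.Set.add, PySem.Set.empty, heq]
    rw [hdates]
    apply List.map_congr_left
    intro d hd
    unfold lastD
    by_cases hxd : bDate x = d
    · have hyd : bDate y = d := heq.trans hxd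
      have e1 : (x :: y :: t).filter (fun v => bDate v == d)
          = x :: y :: t.filter (fun v => bDate v == d) := by
        rw [List.filter_cons_of_pos (by simp [hxd]), List.filter_cons_of_pos (by simp [hyd])]
      have e2 : (y :: t).filter (fun v => bDate v == d)
          = y :: t.filter (fun v => bDate v == d) := by
        rw [List.filter_cons_of_pos (by simp [hyd])]
      rw [e1, e2, List.getLast?_cons_cons]
    · have hyd : ¬ bDate y = d := by rw [heq]; exact hxd
      rw [show (x :: y :: t).filter (fun v => bDate v == d) = t.filter (fun v => bDate v == d) by
            rw [List.filter_cons_of_neg (by simp [hxd]), List.filter_cons_of_neg (by simp [hyd])],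
          show (y :: t).filter (fun v => bDate v == d) = t.filter (fun v => bDate v == d) by
            rw [List.filter_cons_of_neg (by simp [hyd])]]
  | case4 x y t hne ih =>
    intro hp
    rw [keepLast, if_neg hne]
    have hp' := hp
    rw [List.pairwise_cons] at hp'
    have hxy : bDate x < bDate y := lt_of_le_of_ne (hp'.1 y (by simp)) (fun h => hne h.symm)
    have hyt := hp'.2
    rw [List.pairwise_cons] at hyt
    have hlt : ∀ z ∈ y :: t, bDate x < bDate z := by
      intro z hz
      rcases List.mem_cons.mp hz with rfl | hz
      · exact hxy
      · exact lt_of_lt_of_le hxy (hyt.1 z hz)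
    have hltd : ∀ e ∈ (y :: t).map bDate, bDate x < e := by
      intro e he
      obtain ⟨z, hz, rfl⟩ := List.mem_map.mp he
      exact hlt z hz
    have hdates : PySem.Set.ofList ((x :: y :: t).map bDate)
        = bDate x :: PySem.Set.ofList ((y :: t).map bDate) := by
      simp only [List.map_cons]
      show List.foldl PySem.Set.add (PySem.Set.add PySem.Set.empty (bDate x)) (bDate y :: t.map bDate)
        = bDate x :: List.foldl PySem.Set.add PySem.Set.empty (bDate y :: t.map bDate)
      rw [show PySem.Set.add PySem.Set.empty (bDate x) = [bDate x] from rfl]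
      apply foldl_add_cons
      intro z hz
      exact ne_of_gt (hltd z (by simpa using hz))
    have hsorted : PySem.List.sorted (PySem.Set.ofList ((x :: y :: t).map bDate)) (fun s => s) false
        = bDate x :: PySem.List.sorted (PySem.Set.ofList ((y :: t).map bDate)) (fun s => s) false := by
      rw [hdates]
      apply PySem.List.sorted_eq_of_perm_of_pairwise_lt
      · exact List.Perm.cons _ (PySem.List.sorted_perm _ _ _)
      · rw [List.pairwise_cons]
        refine ⟨?_, PySem.List.sorted_ofList_pairwise_lt _⟩
        intro e he
        rw [PySem.List.mem_sorted, PySem.Set.mem_ofList] at he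
        exact hltd e he
    unfold canon
    rw [hsorted, List.map_cons]
    have hfilter : ∀ d, bDate x < d →
        (x :: y :: t).filter (fun v => bDate v == d) = (y :: t).filter (fun v => bDate v == d) := by
      intro d hd
      rw [List.filter_cons, if_neg (by simp; exact ne_of_lt hd)]
    congr 1
    · unfold lastD
      rw [List.filter_cons, if_pos (by simp)]
      have : (y :: t).filter (fun v => bDate v == bDate x) = [] := by
        rw [List.filter_eq_nil_iff]
        intro z hz
        simp only [beq_iff_eq]
        exact fun hh => absurd hh (ne_of_gt (hlt z hz))
      rw [this]
      rfl
    · rw [ih hp'.2]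
      unfold canon
      apply List.map_congr_left
      intro d hd
      rw [PySem.List.mem_sorted, PySem.Set.mem_ofList] at hd
      unfold lastD
      rw [hfilter d (hltd d hd)]

theorem b_eq_canon (xs : List (List (String × String))) : old_uploadDate_alt xs = canon xs := by
  unfold old_uploadDate_alt
  rw [keepLast_canon _ (PySem.List.sorted_pairwise xs bDate)]
  unfold canon
  have hperm : ((PySem.List.sorted xs bDate false).map bDate).Perm (xs.map bDate) :=
    (PySem.List.sorted_perm xs bDate false).map bDate
  have hsetperm : (PySem.Set.ofList ((PySem.List.sorted xs bDate false).map bDate)).Perm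
      (PySem.Set.ofList (xs.map bDate)) := by
    rw [List.perm_ext_iff_of_nodup (PySem.Set.nodup_ofList _) (PySem.Set.nodup_ofList _)]
    intro a
    rw [PySem.Set.mem_ofList, PySem.Set.mem_ofList]
    exact hperm.mem_iff
  rw [PySem.List.sorted_eq_sorted_of_perm _ _ _ (fun a b h => h) hsetperm]
  apply List.map_congr_left
  intro d _
  unfold lastD
  rw [sorted_filter_date]

-- ===== VERDICT (by name: the statement is the Claim_ definition above) =====
theorem old_uploadDate_spec : Claim_equal_old_uploadDate := by
  intro videolist _ _
  unfold Spec_old_uploadDate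
  rw [a_eq_canon, b_eq_canon]
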